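-- pv_equiv track=rewrite | github.com/cschlisner/Algorithms | 3/3.py | sumarr
-- ===== SOURCE A (Python) =====
-- def sumarr(A):
-- 	n = len(A)
-- 	m = [[0 for x in range(n)] for y in range(n)]
-- 	for i in range(0, len(A)-1):
-- 		m[i][i+1] = A[i]+A[i+1]
-- 		for j in range(i+2, len(A)):
-- 			m[i][j] = m[i][j-1]+A[j]
-- 	return m
-- ===== SOURCE B (Python) =====
-- def sumarr(A):
--     n = len(A)
--     P = [0]
--     for x in A:
--         P.append(P[-1] + x)
--     return [[P[j + 1] - P[i] if i < j else 0 for j in range(n)] for i in range(n)]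
-- ===== Notes on version B (the rewrite author's own statement) =====
-- stated objective: simpler
-- what changed: B builds a prefix-sum array once and fills each upper-triangle entry directly as P[j+1]-P[i] in a comprehension, instead of A's in-place running-sum recurrence mutating a preallocated zero matrix.
import Mathlib
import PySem

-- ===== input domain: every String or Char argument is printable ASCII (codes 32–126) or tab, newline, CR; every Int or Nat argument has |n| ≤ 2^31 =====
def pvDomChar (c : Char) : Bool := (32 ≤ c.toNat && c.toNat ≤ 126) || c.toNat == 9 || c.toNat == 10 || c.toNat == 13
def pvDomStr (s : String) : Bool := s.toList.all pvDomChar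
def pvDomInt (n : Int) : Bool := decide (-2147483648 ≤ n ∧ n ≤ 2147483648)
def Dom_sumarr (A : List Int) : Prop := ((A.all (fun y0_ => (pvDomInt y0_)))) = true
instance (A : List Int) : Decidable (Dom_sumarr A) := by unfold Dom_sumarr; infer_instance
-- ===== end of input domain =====

-- B replaces A's in-place running-sum recurrence over a preallocated zero matrix with a
-- prefix-sum array and direct differences P[j+1]-P[i] per upper-triangle entry (simpler, same cost).

-- ===== PORT A =====
-- literal port of A: n×n zero matrix; for i in range(n-1): m[i][i+1]=A[i]+A[i+1];
-- for j in range(i+2,n): m[i][j]=m[i][j-1]+A[j]  (all indices are in range, so getD/set are exact)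
def sumarr (A : List Int) : List (List Int) :=
  let n := A.length
  let m0 : List (List Int) := (List.range n).map (fun _ => (List.range n).map (fun _ => (0 : Int)))
  (List.range (n - 1)).foldl (fun m i =>
    let row0 := (m.getD i []).set (i + 1) (A.getD i 0 + A.getD (i + 1) 0)
    let row1 := (List.range' (i + 2) (n - (i + 2))).foldl
      (fun r j => r.set j (r.getD (j - 1) 0 + A.getD j 0)) row0
    m.set i row1) m0

-- ===== PORT B =====
-- Source B's prefix list: P = [0]; for x in A: P.append(P[-1] + x)
def pvPrefix (A : List Int) : List Int :=
  A.foldl (fun p x => p ++ [p.getD (p.length - 1) 0 + x]) [0]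

-- Source B's comprehension: entry (i,j) is P[j+1]-P[i] if i<j else 0
def sumarr_alt (A : List Int) : List (List Int) :=
  let n := A.length
  let P := pvPrefix A
  (List.range n).map (fun i => (List.range n).map (fun j =>
    if i < j then P.getD (j + 1) 0 - P.getD i 0 else 0))

-- ===== PRECONDITION & SPEC =====
def Spec_sumarr (A : List Int) (out : List (List Int)) : Prop := out = sumarr_alt A
instance (A : List Int) (out : List (List Int)) : Decidable (Spec_sumarr A out) := by unfold Spec_sumarr; infer_instance

-- ===== CLAIM (what is proved, stated in full; the proofs are below) =====
def Claim_equal_sumarr : Prop := ∀ (A : List Int), Dom_sumarr A → Spec_sumarr A (sumarr A)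

-- ===== LEMMAS AND PROOFS =====

-- sum of the first k elements of A
def preS (A : List Int) (k : Nat) : Int := (A.take k).sum

theorem map_range_getD {α : Type} (n : Nat) (f : Nat → α) (p : Nat) (d : α) (hp : p < n) :
    ((List.range n).map f).getD p d = f p := by
  rw [List.getD_eq_getElem _ _ (by simpa using hp)]; simp

theorem map_range_set {α : Type} (n : Nat) (f : Nat → α) (p : Nat) (v : α) :
    ((List.range n).map f).set p v = (List.range n).map (fun t => if t = p then v else f t) := by
  apply List.ext_getElem (by simp)
  intro i h1 h2
  simp [List.getElem_set, eq_comm]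

theorem preS_append (A : List Int) (x : Int) (k : Nat) (hk : k ≤ A.length) :
    preS (A ++ [x]) k = preS A k := by
  simp [preS, List.take_append_of_le_length hk]

theorem pvPrefix_closed (A : List Int) :
    pvPrefix A = (List.range (A.length + 1)).map (preS A) := by
  induction A using List.reverseRecOn with
  | nil => simp [pvPrefix, preS]
  | append_singleton A x ih =>
    have hfold : pvPrefix (A ++ [x]) =
        (pvPrefix A) ++ [(pvPrefix A).getD ((pvPrefix A).length - 1) 0 + x] := by
      simp [pvPrefix, List.foldl_append]
    rw [hfold, ih]
    have hlen : ((List.range (A.length + 1)).map (preS A)).length = A.length + 1 := by simp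
    rw [hlen]
    have hg : ((List.range (A.length + 1)).map (preS A)).getD (A.length + 1 - 1) 0 = preS A A.length := by
      simpa using map_range_getD (A.length + 1) (preS A) A.length 0 (Nat.lt_succ_self _)
    rw [hg]
    have hr : List.range (A.length + 1 + 1) = List.range (A.length + 1) ++ [A.length + 1] :=
      List.range_succ
    simp only [List.length_append, List.length_singleton, hr, List.map_append, List.map_cons,
      List.map_nil]
    congr 1
    · exact (List.map_congr_left (fun k hk => (preS_append A x k (by
        simp [List.mem_range] at hk; omega)).symm))
    · have : (A ++ [x]).take (A.length + 1) = A ++ [x] := List.take_of_length_le (by simp)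
      simp [preS, this]

theorem pvPrefix_getD (A : List Int) (k : Nat) (hk : k ≤ A.length) :
    (pvPrefix A).getD k 0 = preS A k := by
  rw [pvPrefix_closed]; exact map_range_getD _ _ _ _ (by omega)

theorem getD_eq_pre (A : List Int) (t : Nat) (ht : t < A.length) :
    A.getD t 0 = preS A (t + 1) - preS A t := by
  have h : A.take (t + 1) = A.take t ++ [A[t]] := by
    rw [List.take_add_one]; simp [List.getElem?_eq_getElem ht]
  rw [List.getD_eq_getElem _ _ ht, preS, preS, h, List.sum_append]
  simp

-- the row A's inner loop builds, truncated at column bound hi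
def rowC (A : List Int) (i hi : Nat) : List Int :=
  (List.range (A.length)).map (fun j => if i < j ∧ j < hi then preS A (j + 1) - preS A i else 0)

theorem inner_loop (A : List Int) (i k : Nat) (hi : i + 1 < A.length) (hk : i + 2 + k ≤ A.length) :
    (List.range' (i + 2) k).foldl (fun r j => r.set j (r.getD (j - 1) 0 + A.getD j 0))
      (((List.range A.length).map (fun _ => (0 : Int))).set (i + 1) (A.getD i 0 + A.getD (i + 1) 0))
    = rowC A i (i + 2 + k) := by
  induction k with
  | zero =>
    rw [List.range'_zero, List.foldl_nil, map_range_set]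
    unfold rowC
    apply List.map_congr_left
    intro t htm
    simp only [List.mem_range] at htm
    by_cases h : t = i + 1
    · subst h
      rw [getD_eq_pre A i (by omega), getD_eq_pre A (i+1) hi]
      have : i < i + 1 ∧ i + 1 < i + 2 + 0 := by omega
      rw [if_pos rfl, if_pos this]
      ring
    · have : ¬ (i < t ∧ t < i + 2 + 0) := by omega
      simp [h, this]
  | succ k ih =>
    have hk' : i + 2 + k ≤ A.length := by omega
    have hr : List.range' (i + 2) (k + 1) = List.range' (i + 2) k ++ [i + 2 + k] := by
      simpa using (List.range'_concat (s := i + 2) (n := k) (step := 1))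
    rw [hr, List.foldl_append, ih hk', List.foldl_cons, List.foldl_nil]
    unfold rowC
    have hgd : ((List.range A.length).map
        (fun j => if i < j ∧ j < i + 2 + k then preS A (j + 1) - preS A i else 0)).getD
        (i + 2 + k - 1) 0 = preS A (i + 2 + k) - preS A i := by
      rw [map_range_getD _ _ _ _ (by omega)]
      have : i < i + 2 + k - 1 ∧ i + 2 + k - 1 < i + 2 + k := by omega
      rw [if_pos this]
      have harg : i + 2 + k - 1 + 1 = i + 2 + k := by omega
      rw [harg]
    rw [hgd, map_range_set, getD_eq_pre A (i + 2 + k) (by omega)]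
    apply List.map_congr_left
    intro t htm
    simp only [List.mem_range] at htm
    by_cases h : t = i + 2 + k
    · subst h
      have c1 : i < i + 2 + k ∧ i + 2 + k < i + 2 + (k + 1) := by omega
      rw [if_pos rfl, if_pos c1]
      ring
    · have heq : (i < t ∧ t < i + 2 + (k + 1)) ↔ (i < t ∧ t < i + 2 + k) := by omega
      simp [h, heq]

theorem outer_loop (A : List Int) (k : Nat) (hk : k ≤ A.length - 1) :
    (List.range k).foldl (fun m i =>
      let row0 := (m.getD i []).set (i + 1) (A.getD i 0 + A.getD (i + 1) 0)
      let row1 := (List.range' (i + 2) (A.length - (i + 2))).foldl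
        (fun r j => r.set j (r.getD (j - 1) 0 + A.getD j 0)) row0
      m.set i row1)
      ((List.range A.length).map (fun _ => (List.range A.length).map (fun _ => (0 : Int))))
    = (List.range A.length).map (fun i =>
        if i < k then rowC A i A.length else (List.range A.length).map (fun _ => (0 : Int))) := by
  induction k with
  | zero =>
    simp only [List.range_zero, List.foldl_nil]
    apply List.map_congr_left
    intro t htm
    simp
  | succ k ih =>
    have hk' : k ≤ A.length - 1 := by omega
    have hn : k + 1 < A.length := by omega
    rw [List.range_succ, List.foldl_append, ih hk', List.foldl_cons, List.foldl_nil]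
    simp only
    rw [map_range_getD _ _ _ _ (by omega)]
    rw [if_neg (by omega)]
    have harg : k + 2 + (A.length - (k + 2)) = A.length := by omega
    rw [inner_loop A k (A.length - (k + 2)) hn (by omega), harg, map_range_set]
    apply List.map_congr_left
    intro t htm
    simp only [List.mem_range] at htm
    by_cases h : t = k
    · subst h; simp
    · have : (t < k + 1) ↔ (t < k) := by omega
      simp [h, this]

theorem sumarr_eq_alt (A : List Int) : sumarr A = sumarr_alt A := by
  simp only [sumarr, sumarr_alt]
  rw [outer_loop A (A.length - 1) le_rfl]
  apply List.map_congr_left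
  intro i him
  simp only [List.mem_range] at him
  by_cases h : i < A.length - 1
  · rw [if_pos h]
    unfold rowC
    apply List.map_congr_left
    intro j hjm
    simp only [List.mem_range] at hjm
    rw [pvPrefix_getD A (j + 1) (by omega), pvPrefix_getD A i (by omega)]
    have : (i < j ∧ j < A.length) ↔ (i < j) := by omega
    simp only [this]
  · rw [if_neg h]
    apply List.map_congr_left
    intro j hjm
    simp only [List.mem_range] at hjm
    rw [if_neg (by omega)]

-- ===== VERDICT (by name: the statement is the Claim_ definition above) =====
theorem sumarr_spec : Claim_equal_sumarr := by
  intro A _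
  unfold Spec_sumarr
  exact sumarr_eq_alt A
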